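-- pv_equiv track=rewrite | github.com/omniscoder/Helix | src/helix/prime/simulator.py | _apply_rtt
-- ===== SOURCE A (Python) =====
-- def _apply_rtt(reference: str, offset: int, template: str) -> str:
--     if not reference:
--         return template
--     offset = max(0, min(len(reference), offset))
--     window = list(reference)
--     for idx, base in enumerate(template):
--         pos = offset + idx
--         if pos >= len(window):
--             break
--         window[pos] = base
--     return "".join(window)
-- ===== SOURCE B (Python) =====
-- def _apply_rtt(reference: str, offset: int, template: str) -> str:
--     if not reference:
--         return template
--     offset = max(0, min(len(reference), offset))
--     return (reference[:offset]
--             + template[:len(reference) - offset]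
--             + reference[offset + len(template):])
-- ===== Notes on version B (the rewrite author's own statement) =====
-- stated objective: simpler
-- what changed: Replaces the mutable char-list plus indexed enumerate/break loop with a single three-slice concatenation (untouched prefix + truncated template window + unchanged suffix).
import Mathlib
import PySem

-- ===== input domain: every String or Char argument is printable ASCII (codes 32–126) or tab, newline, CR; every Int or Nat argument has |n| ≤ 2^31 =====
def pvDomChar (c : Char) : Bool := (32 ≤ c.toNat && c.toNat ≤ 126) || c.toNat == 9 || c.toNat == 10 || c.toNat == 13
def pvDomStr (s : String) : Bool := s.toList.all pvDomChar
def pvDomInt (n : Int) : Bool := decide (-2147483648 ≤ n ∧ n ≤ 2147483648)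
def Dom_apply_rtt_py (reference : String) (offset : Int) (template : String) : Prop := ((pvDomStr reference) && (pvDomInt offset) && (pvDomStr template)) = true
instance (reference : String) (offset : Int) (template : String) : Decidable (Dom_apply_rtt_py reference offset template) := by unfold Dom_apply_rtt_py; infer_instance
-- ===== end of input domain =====

-- B replaces A's mutable char-list and indexed overwrite loop by one three-slice
-- concatenation (prefix + truncated template + suffix); objective: simpler.

-- ===== PORT A =====
-- the for-idx/base-enumerate loop of A: pos = offset + idx; break when pos ≥ len(window);
-- otherwise window[pos] = base. pos stays ≥ 0 because the clamped offset is ≥ 0, so .toNat is exact.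
def rttLoop : List Char → Int → List Char → List Char
  | window, _, [] => window
  | window, pos, base :: rest =>
    if (window.length : Int) ≤ pos then window
    else rttLoop (window.set pos.toNat base) (pos + 1) rest

def apply_rtt_py (reference : String) (offset : Int) (template : String) : String :=
  if reference = "" then template
  else
    let off : Int := max 0 (min (PySem.Str.len reference) offset)
    String.mk (rttLoop reference.toList off template.toList)

-- ===== PORT B =====
def apply_rtt_py_alt (reference : String) (offset : Int) (template : String) : String :=
  if reference = "" then template
  else
    let off : Int := max 0 (min (PySem.Str.len reference) offset)
    String.mk (PySem.List.slice reference.toList none (some off)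
      ++ PySem.List.slice template.toList none (some (PySem.Str.len reference - off))
      ++ PySem.List.slice reference.toList (some (off + PySem.Str.len template)) none)

-- ===== PRECONDITION & SPEC =====
def Spec_apply_rtt_py (reference : String) (offset : Int) (template : String) (out : String) : Prop := out = apply_rtt_py_alt reference offset template
instance (reference : String) (offset : Int) (template : String) (out : String) : Decidable (Spec_apply_rtt_py reference offset template out) := by unfold Spec_apply_rtt_py; infer_instance

-- ===== CLAIM (what is proved, stated in full; the proofs are below) =====
def Claim_equal_apply_rtt_py : Prop := ∀ (reference : String) (offset : Int) (template : String), Dom_apply_rtt_py reference offset template → Spec_apply_rtt_py reference offset template (apply_rtt_py reference offset template)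

-- ===== LEMMAS AND PROOFS =====

lemma rttLoop_eq (t : List Char) : ∀ (w : List Char) (p : Nat), p ≤ w.length →
    rttLoop w (p : Int) t = w.take p ++ t.take (w.length - p) ++ w.drop (p + t.length) := by
  induction t with
  | nil =>
    intro w p hp
    simp [rttLoop, List.take_append_drop]
  | cons c rest ih =>
    intro w p hp
    rcases lt_or_eq_of_le hp with hlt | heq
    · have hcond : ¬ ((w.length : Int) ≤ (p : Int)) := by exact_mod_cast Nat.not_le.mpr hlt
      have hset : w.set p c = w.take p ++ c :: w.drop (p + 1) := by
        rw [List.set_eq_take_append_cons_drop, if_pos hlt]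
      rw [rttLoop, if_neg hcond]
      have h1 : ((p : Int) + 1) = ((p + 1 : Nat) : Int) := by push_cast; ring
      have htoNat : (p : Int).toNat = p := Int.toNat_natCast p
      rw [htoNat, h1, ih (w.set p c) (p + 1) (by simp [List.length_set]; omega)]
      have htp : (w.take p).length = p := List.length_take_of_le (by omega)
      have hdl : (w.drop (p+1)).length = w.length - (p+1) := List.length_drop ..
      rw [hset]
      have hlen2 : (w.take p ++ c :: w.drop (p + 1)).length = w.length := by
        simp [htp, hdl]; omega
      have e1 : (w.take p ++ c :: w.drop (p + 1)).take (p + 1) = w.take p ++ [c] := by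
        rw [show p + 1 = (w.take p).length + 1 from by rw [htp], List.take_append]
        simp
      have e2 : (w.take p ++ c :: w.drop (p + 1)).drop (p + 1 + rest.length)
          = w.drop (p + 1 + rest.length) := by
        have h0 : (w.take p).drop (p + 1 + rest.length) = [] :=
          List.drop_eq_nil_of_le (by rw [htp]; omega)
        rw [List.drop_append, h0, htp, List.nil_append,
          show p + 1 + rest.length - p = rest.length + 1 from by omega,
          List.drop_succ_cons, List.drop_drop, Nat.add_comm]
      rw [hlen2, e1, e2]
      have e3 : (c :: rest).take (w.length - p) = c :: rest.take (w.length - (p + 1)) := by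
        rw [show w.length - p = (w.length - (p + 1)) + 1 from by omega, List.take_succ_cons]
      rw [e3]
      have e4 : p + (c :: rest).length = p + 1 + rest.length := by simp; omega
      rw [e4]
      simp
    · have hcond : ((w.length : Int) ≤ (p : Int)) := by exact_mod_cast le_of_eq heq.symm
      rw [rttLoop, if_pos hcond]
      subst heq
      simp [List.drop_eq_nil_of_le]

-- ===== VERDICT (by name: the statement is the Claim_ definition above) =====

theorem apply_rtt_py_spec : Claim_equal_apply_rtt_py := by
  unfold Claim_equal_apply_rtt_py Spec_apply_rtt_py
  intro reference offset template _
  unfold apply_rtt_py apply_rtt_py_alt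
  by_cases hr : reference = ""
  · simp [hr]
  · simp only [if_neg hr]
    set r := reference.toList with hrdef
    set t := template.toList with htdef
    have hlenr : PySem.Str.len reference = (r.length : Int) := by
      simp [PySem.Str.len_eq, hrdef]
    have hlent : PySem.Str.len template = (t.length : Int) := by
      simp [PySem.Str.len_eq, htdef]
    set off : Int := max 0 (min (PySem.Str.len reference) offset) with hoff
    have hoff0 : 0 ≤ off := le_max_left ..
    have hoffn : off ≤ (r.length : Int) := by
      rw [hoff, hlenr]; exact max_le (by positivity) (min_le_left ..)
    set p : Nat := off.toNat with hp
    have hofp : off = (p : Int) := (Int.toNat_of_nonneg hoff0).symm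
    have hpn : p ≤ r.length := by omega
    have s1 : PySem.List.slice r none (some off) = r.take p := by
      rw [hofp]; exact PySem.List.slice_to_natCast ..
    have s2 : PySem.List.slice t none (some (PySem.Str.len reference - off))
        = t.take (r.length - p) := by
      rw [show PySem.Str.len reference - off = ((r.length - p : Nat) : Int) from by
        rw [hlenr, hofp]; omega]
      exact PySem.List.slice_to_natCast ..
    have s3 : PySem.List.slice r (some (off + PySem.Str.len template)) none
        = r.drop (p + t.length) := by
      rw [show off + PySem.Str.len template = ((p + t.length : Nat) : Int) from by
        rw [hlent, hofp]; push_cast; ring]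
      exact PySem.List.slice_from_natCast ..
    rw [s1, s2, s3, hofp, rttLoop_eq t r p hpn]
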